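-- pv_equiv track=rewrite | github.com/ToSimb/agent | monitoring/service.py | calculate_gcd_for_group
-- ===== SOURCE A (Python) =====
-- import math
-- from functools import reduce
--
-- def calculate_gcd_for_group(item_ids, interval_map):
--     intervals = set()
--
--     for item_id in item_ids:
--         item_intervals = interval_map.get(item_id, set())
--         intervals.update(i for i in item_intervals if i != 0)
--     if not intervals:
--         return None
--     return reduce(math.gcd, intervals)
-- ===== SOURCE B (Python) =====
-- import math
--
--
-- def calculate_gcd_for_group(item_ids, interval_map):
--     g = 0
--     for item_id in item_ids:
--         for i in interval_map.get(item_id, ()):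
--             g = math.gcd(g, i)
--     return g or None
-- ===== Notes on version B (the rewrite author's own statement) =====
-- stated objective: simpler
-- what changed: Replaced A's collect-nonzero-values-into-a-set then reduce(math.gcd) with a single pass folding math.gcd into one integer accumulator (gcd(g,0)=g makes the zero-filter and the set unnecessary), avoiding the intermediate set/generator allocation.
-- intended difference: On inputs whose nonzero intervals are all one identical negative value x, A returns x verbatim (reduce over a singleton set returns its element unreduced) while B returns -x; a GCD should be the nonnegative greatest common divisor, so B's value is the intended one. — e.g. on calculate_gcd_for_group([1], [(1, [-6])]): A returns some (-6), B returns some 6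
import Mathlib
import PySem

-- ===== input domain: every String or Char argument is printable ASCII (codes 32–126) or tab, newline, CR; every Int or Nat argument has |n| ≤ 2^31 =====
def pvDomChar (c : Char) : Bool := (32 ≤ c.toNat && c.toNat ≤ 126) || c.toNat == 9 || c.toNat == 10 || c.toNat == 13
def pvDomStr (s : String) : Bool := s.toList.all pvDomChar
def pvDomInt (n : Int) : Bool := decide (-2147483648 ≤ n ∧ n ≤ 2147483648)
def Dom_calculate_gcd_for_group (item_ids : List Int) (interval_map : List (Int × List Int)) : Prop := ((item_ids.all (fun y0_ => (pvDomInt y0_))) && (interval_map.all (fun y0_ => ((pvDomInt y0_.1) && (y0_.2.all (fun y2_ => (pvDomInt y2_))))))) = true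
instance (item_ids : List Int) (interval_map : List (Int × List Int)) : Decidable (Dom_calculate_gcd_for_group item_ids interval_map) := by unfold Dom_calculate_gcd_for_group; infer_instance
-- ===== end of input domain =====

-- B replaces A's collect-nonzero-into-a-set-then-reduce with a single pass folding
-- math.gcd into one integer accumulator (objective: simpler); on the corner where the
-- only distinct nonzero interval is negative the values differ, stated below as D_.

-- ===== PORT A =====
-- math.gcd(a, b): the nonnegative gcd of the absolute values
def pyGcd (a b : Int) : Int := (Int.gcd a b : Int)

-- Literal port of A. reduce(math.gcd, intervals) iterates the set in Python's hash order,
-- which PySem does not model; we fold in the set's insertion order — exact because the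
-- result is order-independent (gcd is associative/commutative, and a singleton set is
-- returned verbatim regardless of order).
def calculate_gcd_for_group (item_ids : List Int) (interval_map : List (Int × List Int)) : Option Int :=
  let intervals : PySem.Set Int :=
    item_ids.foldl
      (fun s item_id =>
        PySem.Set.update s ((PySem.Dict.getD ⟨interval_map⟩ item_id []).filter (fun i => i != 0)))
      PySem.Set.empty
  match intervals with
  | [] => none
  | x :: xs => some (xs.foldl pyGcd x)

-- ===== PORT B =====
-- B: fold math.gcd over every interval of the group into one accumulator; 'g or None'.
def calculate_gcd_for_group_alt (item_ids : List Int) (interval_map : List (Int × List Int)) : Option Int :=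
  let g :=
    item_ids.foldl
      (fun g item_id => (PySem.Dict.getD ⟨interval_map⟩ item_id []).foldl pyGcd g) 0
  if g == 0 then none else some g

-- ===== PRECONDITION & SPEC =====
-- On inputs whose nonzero intervals are all one identical negative value x, A returns x
-- verbatim (reduce over a singleton set) while B returns -x; a GCD should be the
-- nonnegative greatest common divisor, so B's value is the intended one.
-- (List.lookup = Python dict lookup, first matching key; a missing id contributes no intervals.)
def D_calculate_gcd_for_group (item_ids : List Int) (interval_map : List (Int × List Int)) : Prop :=
  ∃ id ∈ item_ids, ∃ x ∈ (List.lookup id interval_map).getD [],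
    x < 0 ∧ ∀ id' ∈ item_ids, ∀ i ∈ (List.lookup id' interval_map).getD [], i = 0 ∨ i = x
instance (item_ids : List Int) (interval_map : List (Int × List Int)) : Decidable (D_calculate_gcd_for_group item_ids interval_map) := by unfold D_calculate_gcd_for_group; infer_instance

def Spec_calculate_gcd_for_group (item_ids : List Int) (interval_map : List (Int × List Int)) (out : Option Int) : Prop := ¬ D_calculate_gcd_for_group item_ids interval_map → out = calculate_gcd_for_group_alt item_ids interval_map
instance (item_ids : List Int) (interval_map : List (Int × List Int)) (out : Option Int) : Decidable (Spec_calculate_gcd_for_group item_ids interval_map out) := by unfold Spec_calculate_gcd_for_group; infer_instance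

def pvDiffWitness_calculate_gcd_for_group : List Int × (List (Int × List Int)) := ([1], [(1, [-6])])
def pvDiffWitnessOut_calculate_gcd_for_group : (Option Int) × (Option Int) := (some (-6), some 6)

-- ===== CLAIM =====
def Claim_unchanged_calculate_gcd_for_group : Prop := ∀ (item_ids : List Int) (interval_map : List (Int × List Int)), Dom_calculate_gcd_for_group item_ids interval_map → Spec_calculate_gcd_for_group item_ids interval_map (calculate_gcd_for_group item_ids interval_map)
def Claim_changed_calculate_gcd_for_group : Prop := Dom_calculate_gcd_for_group (pvDiffWitness_calculate_gcd_for_group.1) (pvDiffWitness_calculate_gcd_for_group.2) ∧ D_calculate_gcd_for_group (pvDiffWitness_calculate_gcd_for_group.1) (pvDiffWitness_calculate_gcd_for_group.2) ∧ calculate_gcd_for_group (pvDiffWitness_calculate_gcd_for_group.1) (pvDiffWitness_calculate_gcd_for_group.2) = pvDiffWitnessOut_calculate_gcd_for_group.1 ∧ calculate_gcd_for_group_alt (pvDiffWitness_calculate_gcd_for_group.1) (pvDiffWitness_calculate_gcd_for_group.2) = pvDiffWitnessOut_calculate_gcd_for_group.2 ∧ pvDiffWitnessOut_calculate_gcd_for_group.1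 ≠ pvDiffWitnessOut_calculate_gcd_for_group.2
def Claim_exact_calculate_gcd_for_group : Prop := ∀ (item_ids : List Int) (interval_map : List (Int × List Int)), Dom_calculate_gcd_for_group item_ids interval_map → D_calculate_gcd_for_group item_ids interval_map → calculate_gcd_for_group item_ids interval_map ≠ calculate_gcd_for_group_alt item_ids interval_map

-- ===== LEMMAS AND PROOFS =====

-- the flat list of the group's nonzero intervals (proof-side view of the traversal)
def nzAll (item_ids : List Int) (interval_map : List (Int × List Int)) : List Int :=
  (item_ids.flatMap (fun id => PySem.Dict.getD ⟨interval_map⟩ id [])).filter (fun i => i != 0)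

theorem lookup_getD (m : List (Int × List Int)) (id : Int) :
    ((List.lookup id m).getD []) = PySem.Dict.getD ⟨m⟩ id [] := by
  induction m with
  | nil => rfl
  | cons p rest ih =>
    obtain ⟨k, v⟩ := p
    simp only [List.lookup, PySem.Dict.getD, PySem.Dict.get?_mk_cons]
    by_cases h : k = id
    · simp [h]
    · have h1 : (id == k) = false := by simp [Ne.symm h]
      have h2 : (k == id) = false := by simp [h]
      rw [h1, h2]
      simpa [PySem.Dict.getD] using ih

theorem mem_nzAll (item_ids : List Int) (interval_map : List (Int × List Int)) (x : Int) :
    x ∈ nzAll item_ids interval_map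
      ↔ (∃ id ∈ item_ids, x ∈ PySem.Dict.getD ⟨interval_map⟩ id []) ∧ x ≠ 0 := by
  simp [nzAll, List.mem_filter, List.mem_flatMap]

-- D_ in terms of the flat nonzero list
theorem D_iff (item_ids : List Int) (interval_map : List (Int × List Int)) :
    D_calculate_gcd_for_group item_ids interval_map
      ↔ ∃ x ∈ nzAll item_ids interval_map,
          x < 0 ∧ ∀ i ∈ nzAll item_ids interval_map, i = x := by
  unfold D_calculate_gcd_for_group
  simp only [lookup_getD]
  constructor
  · rintro ⟨id, hid, x, hxmem, hxneg, hall⟩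
    refine ⟨x, (mem_nzAll _ _ x).mpr ⟨⟨id, hid, hxmem⟩, by omega⟩, hxneg, ?_⟩
    intro i hi
    obtain ⟨⟨id', hid', hmem'⟩, hi0⟩ := (mem_nzAll _ _ i).mp hi
    rcases hall id' hid' i hmem' with h | h
    · exact absurd h hi0
    · exact h
  · rintro ⟨x, hx, hxneg, hall⟩
    obtain ⟨⟨id, hid, hmem⟩, hx0⟩ := (mem_nzAll _ _ x).mp hx
    refine ⟨id, hid, x, hmem, hxneg, ?_⟩
    intro id' hid' i hmem'
    by_cases hi0 : i = 0
    · exact Or.inl hi0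
    · exact Or.inr (hall i ((mem_nzAll _ _ i).mpr ⟨⟨id', hid', hmem'⟩, hi0⟩))

-- folding Nat.gcd of absolute values
def nfold (xs : List Int) (n : Nat) : Nat :=
  xs.foldl (fun n a => Nat.gcd n a.natAbs) n

theorem nfold_cons (a : Int) (xs : List Int) (n : Nat) :
    nfold (a :: xs) n = nfold xs (Nat.gcd n a.natAbs) := rfl

theorem nfold_gcd (xs : List Int) (n : Nat) : nfold xs n = Nat.gcd n (nfold xs 0) := by
  induction xs generalizing n with
  | nil => simp [nfold]
  | cons a xs ih =>
    rw [nfold_cons, nfold_cons, ih, ih (Nat.gcd 0 a.natAbs)]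
    simp [Nat.gcd_assoc]

theorem nfold_dvd_mem (xs : List Int) (a : Int) (ha : a ∈ xs) : nfold xs 0 ∣ a.natAbs := by
  induction xs with
  | nil => simp at ha
  | cons b xs ih =>
    rw [nfold_cons, nfold_gcd]
    rcases List.mem_cons.mp ha with h | h
    · subst h; simpa using Nat.gcd_dvd_left _ _
    · exact Dvd.dvd.trans (Nat.gcd_dvd_right _ _) (ih h)

theorem dvd_nfold (xs : List Int) (d : Nat) (h : ∀ a ∈ xs, d ∣ a.natAbs) : d ∣ nfold xs 0 := by
  induction xs with
  | nil => simp [nfold]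
  | cons b xs ih =>
    rw [nfold_cons, nfold_gcd]
    exact Nat.dvd_gcd (by simpa using h b (by simp)) (ih (fun a ha => h a (by simp [ha])))

theorem nfold_ext (xs ys : List Int) (h : ∀ a, a ∈ xs ↔ a ∈ ys) : nfold xs 0 = nfold ys 0 :=
  Nat.dvd_antisymm
    (dvd_nfold ys _ (fun a ha => nfold_dvd_mem xs a ((h a).mpr ha)))
    (dvd_nfold xs _ (fun a ha => nfold_dvd_mem ys a ((h a).mp ha)))

-- zeros do not change the fold
theorem nfold_filter (xs : List Int) (n : Nat) :
    nfold xs n = nfold (xs.filter (fun i => i != 0)) n := by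
  induction xs generalizing n with
  | nil => rfl
  | cons a xs ih =>
    by_cases ha : a = 0
    · subst ha
      rw [nfold_cons, List.filter_cons_of_neg (by simp)]
      simpa using ih n
    · rw [nfold_cons, List.filter_cons_of_pos (by simpa using ha), nfold_cons]
      exact ih _

-- fold pyGcd starting from a cast Nat is the Nat fold
theorem foldl_pyGcd_natCast (xs : List Int) (n : Nat) :
    xs.foldl pyGcd (n : Int) = ((nfold xs n : Nat) : Int) := by
  induction xs generalizing n with
  | nil => rfl
  | cons a xs ih =>
    rw [List.foldl_cons, nfold_cons]
    have : pyGcd (n : Int) a = ((Nat.gcd n a.natAbs : Nat) : Int) := by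
      simp [pyGcd, Int.gcd]
    rw [this, ih]

-- A's reduce over a list with at least two elements
theorem foldl_pyGcd_two (x y : Int) (t : List Int) :
    (y :: t).foldl pyGcd x = ((nfold (x :: y :: t) 0 : Nat) : Int) := by
  rw [List.foldl_cons]
  have hx : pyGcd x y = ((Nat.gcd x.natAbs y.natAbs : Nat) : Int) := by
    simp [pyGcd, Int.gcd]
  rw [hx, foldl_pyGcd_natCast]
  simp [nfold_cons]

-- gcd-fold of a nonempty all-equal list
theorem nfold_all_eq (xs : List Int) (x : Int) (hx : x ∈ xs) (h : ∀ i ∈ xs, i = x) :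
    nfold xs 0 = x.natAbs :=
  Nat.dvd_antisymm (nfold_dvd_mem xs x hx)
    (dvd_nfold xs _ (fun a ha => by rw [h a ha]))

-- the unfiltered flat list of the group's intervals
def allList (item_ids : List Int) (interval_map : List (Int × List Int)) : List Int :=
  item_ids.flatMap (fun id => PySem.Dict.getD ⟨interval_map⟩ id [])

theorem nzAll_eq_filter (item_ids : List Int) (interval_map : List (Int × List Int)) :
    nzAll item_ids interval_map = (allList item_ids interval_map).filter (fun i => i != 0) := rfl

-- A's set-building loop builds Set.ofList of the flat nonzero list
theorem a_set_eq (item_ids : List Int) (interval_map : List (Int × List Int)) :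
    item_ids.foldl
      (fun s item_id =>
        PySem.Set.update s ((PySem.Dict.getD ⟨interval_map⟩ item_id []).filter (fun i => i != 0)))
      PySem.Set.empty
      = PySem.Set.ofList (nzAll item_ids interval_map) := by
  have key : ∀ (ids : List Int) (s : PySem.Set Int),
      ids.foldl
        (fun s item_id =>
          PySem.Set.update s ((PySem.Dict.getD ⟨interval_map⟩ item_id []).filter (fun i => i != 0)))
        s
      = PySem.Set.update s ((allList ids interval_map).filter (fun i => i != 0)) := by
    intro ids
    induction ids with
    | nil => intro s; simp [allList, PySem.Set.update_nil]
    | cons id ids ih =>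
      intro s
      rw [List.foldl_cons, ih]
      simp only [allList, List.flatMap_cons, List.filter_append]
      rw [PySem.Set.update_append]
  rw [key, nzAll_eq_filter]
  exact PySem.Set.update_nil_left _

-- B's nested loop is the pyGcd fold over the flat list
theorem b_fold_eq (item_ids : List Int) (interval_map : List (Int × List Int)) (g : Int) :
    item_ids.foldl
      (fun g item_id => (PySem.Dict.getD ⟨interval_map⟩ item_id []).foldl pyGcd g) g
    = (allList item_ids interval_map).foldl pyGcd g := by
  induction item_ids generalizing g with
  | nil => rfl
  | cons id ids ih =>
    rw [List.foldl_cons, ih]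
    simp [allList, List.flatMap_cons, List.foldl_append]

-- B's result as a function of the nonzero flat list
theorem b_result (item_ids : List Int) (interval_map : List (Int × List Int)) :
    calculate_gcd_for_group_alt item_ids interval_map
      = (if nfold (nzAll item_ids interval_map) 0 = 0 then none
         else some ((nfold (nzAll item_ids interval_map) 0 : Nat) : Int)) := by
  unfold calculate_gcd_for_group_alt
  rw [b_fold_eq]
  have h0 : (0 : Int) = ((0 : Nat) : Int) := rfl
  rw [h0, foldl_pyGcd_natCast, nfold_filter, ← nzAll_eq_filter]
  by_cases h : nfold (nzAll item_ids interval_map) 0 = 0 <;> simp [h]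

-- elements of the nonzero flat list are nonzero
theorem nzAll_ne_zero (item_ids : List Int) (interval_map : List (Int × List Int)) :
    ∀ i ∈ nzAll item_ids interval_map, i ≠ 0 := by
  intro i hi
  rw [nzAll_eq_filter] at hi
  simpa using (List.mem_filter.mp hi).2

theorem nfold_nzAll_ne_zero (item_ids : List Int) (interval_map : List (Int × List Int))
    (x : Int) (hx : x ∈ nzAll item_ids interval_map) :
    nfold (nzAll item_ids interval_map) 0 ≠ 0 := by
  intro h
  have := nfold_dvd_mem _ x hx
  rw [h] at this
  exact nzAll_ne_zero item_ids interval_map x hx (by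
    have := Nat.eq_zero_of_zero_dvd this
    omega)

-- the discard of an all-equal tail is empty
theorem discard_all_eq (xs : List Int) (x : Int) (h : ∀ i ∈ xs, i = x) :
    PySem.Set.discard (PySem.Set.ofList xs) x = [] := by
  apply List.eq_nil_iff_forall_not_mem.mpr
  intro y hy
  rw [PySem.Set.mem_discard] at hy
  exact hy.2 (h y ((PySem.Set.mem_ofList _ _).mp hy.1))

-- the crux: outside D_ the two programs agree
theorem main_eq (item_ids : List Int) (interval_map : List (Int × List Int))
    (hD : ¬ D_calculate_gcd_for_group item_ids interval_map) :
    calculate_gcd_for_group item_ids interval_map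
      = calculate_gcd_for_group_alt item_ids interval_map := by
  rw [b_result]
  unfold calculate_gcd_for_group
  rw [a_set_eq]
  cases hcase : nzAll item_ids interval_map with
  | nil => simp [PySem.Set.ofList_nil, nfold]
  | cons x xs =>
    have hnz : ∀ i ∈ x :: xs, i ≠ 0 := by
      rw [← hcase]; exact nzAll_ne_zero _ _
    have hn0 : nfold (x :: xs) 0 ≠ 0 := by
      rw [← hcase]
      exact nfold_nzAll_ne_zero _ _ x (by rw [hcase]; simp)
    rw [PySem.Set.ofList_cons]
    by_cases hall : ∀ i ∈ xs, i = x
    · -- the set is the singleton [x]; A returns x, B returns |x|; ¬D_ gives 0 < x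
      have hallL : ∀ i ∈ x :: xs, i = x := by
        intro i hi
        rcases List.mem_cons.mp hi with h | h
        · exact h
        · exact hall i h
      have hxpos : 0 < x := by
        rcases lt_trichotomy x 0 with h | h | h
        · exact absurd ((D_iff item_ids interval_map).mpr
            ⟨x, by rw [hcase]; simp, h, by rw [hcase]; exact hallL⟩) hD
        · exact absurd h (hnz x (by simp))
        · exact h
      rw [discard_all_eq xs x hall]
      have hnf : nfold (x :: xs) 0 = x.natAbs := nfold_all_eq _ x (by simp) hallL
      dsimp only
      rw [List.foldl_nil, hnf, if_neg (hnf ▸ hn0), Int.natAbs_of_nonneg (le_of_lt hxpos)]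
    · -- the set has ≥ 2 elements: both return the nonnegative gcd of all of them
      push Not at hall
      rcases hall with ⟨y, hy, hyx⟩
      have hymem : y ∈ PySem.Set.discard (PySem.Set.ofList xs) x := by
        rw [PySem.Set.mem_discard, PySem.Set.mem_ofList]; exact ⟨hy, hyx⟩
      cases hd : PySem.Set.discard (PySem.Set.ofList xs) x with
      | nil => rw [hd] at hymem; simp at hymem
      | cons z t =>
        dsimp only
        rw [foldl_pyGcd_two]
        have hmem : ∀ a, a ∈ (x :: z :: t) ↔ a ∈ (x :: xs) := by
          intro a
          constructor
          · intro h
            rcases List.mem_cons.mp h with h | h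
            · simp [h]
            · have : a ∈ PySem.Set.discard (PySem.Set.ofList xs) x := by rw [hd]; exact h
              rw [PySem.Set.mem_discard, PySem.Set.mem_ofList] at this
              simp [this.1]
          · intro h
            rcases List.mem_cons.mp h with h | h
            · simp [h]
            · by_cases hax : a = x
              · simp [hax]
              · have : a ∈ PySem.Set.discard (PySem.Set.ofList xs) x := by
                  rw [PySem.Set.mem_discard, PySem.Set.mem_ofList]; exact ⟨h, hax⟩
                rw [hd] at this
                simp [this]
        rw [nfold_ext _ _ hmem, if_neg hn0]

-- ===== VERDICT =====
theorem calculate_gcd_for_group_spec : Claim_unchanged_calculate_gcd_for_group := by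
  intro item_ids interval_map _
  unfold Spec_calculate_gcd_for_group
  intro hD
  exact main_eq item_ids interval_map hD

theorem calculate_gcd_for_group_changed : Claim_changed_calculate_gcd_for_group := by
  unfold Claim_changed_calculate_gcd_for_group; decide

theorem calculate_gcd_for_group_tight : Claim_exact_calculate_gcd_for_group := by
  intro item_ids interval_map _ hD
  rcases (D_iff item_ids interval_map).mp hD with ⟨x, hx, hxneg, hall⟩
  rw [b_result]
  unfold calculate_gcd_for_group
  rw [a_set_eq]
  have hn0 : nfold (nzAll item_ids interval_map) 0 ≠ 0 :=
    nfold_nzAll_ne_zero item_ids interval_map x hx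
  have hnf : nfold (nzAll item_ids interval_map) 0 = x.natAbs :=
    nfold_all_eq _ x hx hall
  cases hcase : nzAll item_ids interval_map with
  | nil => rw [hcase] at hx; simp at hx
  | cons z t =>
    have hz : z = x := hall z (by rw [hcase]; simp)
    have htall : ∀ i ∈ t, i = z := by
      intro i hi; rw [hz]; exact hall i (by rw [hcase]; simp [hi])
    rw [PySem.Set.ofList_cons, discard_all_eq t z htall]
    rw [hcase] at hnf hn0
    dsimp only
    rw [List.foldl_nil, hnf, if_neg (hnf ▸ hn0), hz]
    intro hcon
    have := Option.some.inj hcon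
    omega
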